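-- pv_equiv track=rewrite | github.com/rjhelms/AoC2023 | 01/01b.py | find_digit_at_index
-- ===== SOURCE A (Python) =====
-- STRINGS = ['one', 'two', 'three', 'four', 'five', 'six', 'seven', 'eight', 'nine']
--
-- def find_digit_at_index(string, index):
--     substring = string[index:]
--     # check from part A - is it a digit?
--     if substring[:1].isdigit():
--         return int(substring[:1])
--
--     # else, start checking for text values
--     for i in range(len(STRINGS)):
--         check_length = len(STRINGS[i])
--         if len(string[index:]) < check_length:
--             continue
--         if string[index:index+check_length] == STRINGS[i]:
--             return i+1
--     return None
-- ===== SOURCE B (Python) =====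
-- def _build_trie():
--     words = ['one', 'two', 'three', 'four', 'five', 'six', 'seven', 'eight', 'nine']
--     edges = {}
--     values = {}
--     counter = 1
--     for i, word in enumerate(words):
--         node = 0
--         for ch in word:
--             nxt = edges.get((node, ch))
--             if nxt is None:
--                 nxt = counter
--                 counter += 1
--                 edges[(node, ch)] = nxt
--             node = nxt
--         values[node] = i + 1
--     return edges, values
--
-- EDGES, VALUES = _build_trie()
--
-- def find_digit_at_index(string, index):
--     substring = string[index:]
--     if substring[:1].isdigit():
--         return int(substring[:1])
--     node = 0
--     for ch in substring:
--         node = EDGES.get((node, ch))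
--         if node is None:
--             return None
--         value = VALUES.get(node)
--         if value is not None:
--             return value
--     return None
-- ===== Notes on version B (the rewrite author's own statement) =====
-- stated objective: alternative
-- what changed: B replaces A's loop of nine per-word slice-and-compare checks by a precomputed trie of the spelled digits (flat edge and value tables built once at module level) that is walked character by character over the substring, stopping at the first accepting state.
-- intended difference: For index < 0 where a spelled word sits at the (clamped) position but index + len(word) >= 0 (or index < -len(string)), A's slice string[index:index+len(word)] crosses zero and clamps to '' so A returns None although the word is there (e.g. A('one', -3) is None); B walks substring = string[index:] itself and returns the word's value (1 for 'one'), the intended result. — e.g. on find_digit_at_index("one", -3): A returns none, B returns some 1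
import Mathlib
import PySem

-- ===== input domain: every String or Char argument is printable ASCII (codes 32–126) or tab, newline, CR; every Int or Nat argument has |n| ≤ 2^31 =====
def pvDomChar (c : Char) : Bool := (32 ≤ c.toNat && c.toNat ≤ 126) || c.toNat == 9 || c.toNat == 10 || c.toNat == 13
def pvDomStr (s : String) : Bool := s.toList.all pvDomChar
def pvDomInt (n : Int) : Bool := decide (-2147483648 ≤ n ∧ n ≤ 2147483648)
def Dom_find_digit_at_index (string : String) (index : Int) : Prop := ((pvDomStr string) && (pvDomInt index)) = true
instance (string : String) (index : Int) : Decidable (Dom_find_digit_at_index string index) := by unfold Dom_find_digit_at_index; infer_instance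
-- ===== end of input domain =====

-- B replaces A's nine per-word slice comparisons by a precomputed trie (flat edge/value
-- tables) walked character by character over the substring; objective: alternative.
-- On negative indices where A's slice string[index:index+L] crosses zero and clamps to "",
-- A misses the word (see D_ below); B returns it — the intended value.

-- ===== PORT A =====
-- STRINGS = ['one', ..., 'nine']
def pvSTRINGS : List (List Char) :=
  ["one".toList, "two".toList, "three".toList, "four".toList, "five".toList,
   "six".toList, "seven".toList, "eight".toList, "nine".toList]

-- the 'for i in range(len(STRINGS))' loop of A, walking (index, STRINGS[index]) pairs
def pvLoopA (s : List Char) (index : Int) : List (Int × List Char) → Option Int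
  | [] => none                      -- loop exhausted: 'return None'
  | (i, w) :: rest =>
    let check_length := (w.length : Int)
    if ((PySem.List.slice s (some index) none).length : Int) < check_length then
      pvLoopA s index rest
    else if PySem.List.slice s (some index) (some (index + check_length)) = w then
      some (i + 1)
    else pvLoopA s index rest

def find_digit_at_index (string : String) (index : Int) : Option Int :=
  let s := string.toList
  let substring := PySem.List.slice s (some index) none
  let first := PySem.List.slice substring none (some 1)
  if PySem.Chars.strIsdigit first then
    PySem.Int.ofChars? first        -- int(substring[:1]); none = ValueError (unreachable on ASCII digits)
  else
    pvLoopA s index (PySem.List.enumerate pvSTRINGS)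

-- ===== PORT B =====
-- _build_trie(): nested for-loops building flat EDGES/VALUES tables; state (edges, values, counter)
def pvWordsB : List (List Char) :=
  ["one".toList, "two".toList, "three".toList, "four".toList, "five".toList,
   "six".toList, "seven".toList, "eight".toList, "nine".toList]

def pvTrie : (PySem.Dict (Int × Char) Int) × (PySem.Dict Int Int) :=
  let st := (PySem.List.enumerate pvWordsB).foldl
    (fun (st : PySem.Dict (Int × Char) Int × PySem.Dict Int Int × Int) iw =>
      -- inner 'for ch in word' loop, state (edges, counter, node)
      let inner := iw.2.foldl
        (fun (t : PySem.Dict (Int × Char) Int × Int × Int) ch =>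
          match PySem.Dict.get? t.1 (t.2.2, ch) with
          | some nxt => (t.1, t.2.1, nxt)
          | none => (PySem.Dict.insert t.1 (t.2.2, ch) t.2.1, t.2.1 + 1, t.2.1))
        (st.1, st.2.2, 0)
      (inner.1, PySem.Dict.insert st.2.1 inner.2.2 (iw.1 + 1), inner.2.1))
    (PySem.Dict.empty, PySem.Dict.empty, 1)
  (st.1, st.2.1)

def pvEDGES : PySem.Dict (Int × Char) Int := pvTrie.1
def pvVALUES : PySem.Dict Int Int := pvTrie.2

-- the 'for ch in substring' automaton walk
def pvWalk (node : Int) : List Char → Option Int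
  | [] => none
  | c :: rest =>
    match PySem.Dict.get? pvEDGES (node, c) with
    | none => none
    | some n =>
      match PySem.Dict.get? pvVALUES n with
      | some v => some v
      | none => pvWalk n rest

def find_digit_at_index_alt (string : String) (index : Int) : Option Int :=
  let s := string.toList
  let substring := PySem.List.slice s (some index) none
  let first := PySem.List.slice substring none (some 1)
  if PySem.Chars.strIsdigit first then
    PySem.Int.ofChars? first
  else
    pvWalk 0 substring

-- ===== PRECONDITION & SPEC =====
-- For index < 0 with a spelled word at the clamped position but index+len(word) ≥ 0 (or
-- index < -len(string)), A's slice string[index:index+len(word)] clamps to "" and A returns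
-- None although the word is there; B scans string[index:] itself and returns the word's
-- value, the intended result.
def D_find_digit_at_index (string : String) (index : Int) : Prop :=
  index < 0 ∧
  (["one", "two", "three", "four", "five", "six", "seven", "eight", "nine"].any
    (fun w => w.toList.isPrefixOf (string.toList.drop (max 0 ((string.length : Int) + index)).toNat)
      && (decide (index < -(string.length : Int)) || decide (0 ≤ index + (w.toList.length : Int))))) = true
instance (string : String) (index : Int) : Decidable (D_find_digit_at_index string index) := by
  unfold D_find_digit_at_index; infer_instance

def Spec_find_digit_at_index (string : String) (index : Int) (out : Option Int) : Prop :=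
  ¬ D_find_digit_at_index string index → out = find_digit_at_index_alt string index
instance (string : String) (index : Int) (out : Option Int) : Decidable (Spec_find_digit_at_index string index out) := by unfold Spec_find_digit_at_index; infer_instance

def pvDiffWitness_find_digit_at_index : String × Int := ("one", -3)
def pvDiffWitnessOut_find_digit_at_index : (Option Int) × (Option Int) := (none, some 1)

-- ===== CLAIM (what is proved, stated in full; the proofs are below) =====
def Claim_unchanged_find_digit_at_index : Prop := ∀ (string : String) (index : Int), Dom_find_digit_at_index string index → Spec_find_digit_at_index string index (find_digit_at_index string index)
def Claim_changed_find_digit_at_index : Prop := Dom_find_digit_at_index (pvDiffWitness_find_digit_at_index.1) (pvDiffWitness_find_digit_at_index.2) ∧ D_find_digit_at_index (pvDiffWitness_find_digit_at_index.1) (pvDiffWitness_find_digit_at_index.2) ∧ find_digit_at_index (pvDiffWitness_find_digit_at_index.1) (pvDiffWitness_find_digit_at_index.2) = pvDiffWitnessOut_find_digit_at_index.1 ∧ find_digit_at_index_alt (pvDiffWitness_find_digit_at_index.1) (pvDiffWitness_find_digit_at_index.2) = pvDiffWitnessOut_find_digit_at_index.2 ∧ pvDiffWitnessOut_find_digit_at_index.1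 ≠ pvDiffWitnessOut_find_digit_at_index.2
def Claim_exact_find_digit_at_index : Prop := ∀ (string : String) (index : Int), Dom_find_digit_at_index string index → D_find_digit_at_index string index → find_digit_at_index string index ≠ find_digit_at_index_alt string index

-- ===== LEMMAS AND PROOFS =====

-- concrete tables of the built trie
set_option maxRecDepth 40000 in
lemma edges_eq : pvEDGES = PySem.Dict.mk [((0, 'o'), 1), ((1, 'n'), 2), ((2, 'e'), 3), ((0, 't'), 4), ((4, 'w'), 5), ((5, 'o'), 6), ((4, 'h'), 7), ((7, 'r'), 8), ((8, 'e'), 9), ((9, 'e'), 10), ((0, 'f'), 11), ((11, 'o'), 12), ((12, 'u'), 13), ((13, 'r'), 14), ((11, 'i'), 15), ((15, 'v'), 16), ((16, 'e'), 17), ((0, 's'), 18), ((18, 'i'), 19), ((19, 'x'), 20), ((18, 'e'), 21), ((21, 'v'), 22), ((22, 'e'), 23), ((23, 'n'), 24), ((0, 'e'), 25), ((25, 'i'), 26), ((26, 'g'), 27), ((27, 'h'), 28), ((28, 't'), 29), ((0, 'n'), 30), ((30, 'i'), 31), ((31, 'n'), 32), ((32, 'e'), 33)] := by decide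
set_option maxRecDepth 40000 in
lemma values_eq : pvVALUES = PySem.Dict.mk [(3, 1), (6, 2), (10, 3), (14, 4), (17, 5), (20, 6), (24, 7), (29, 8), (33, 9)] := by decide

set_option maxRecDepth 40000

lemma pvWalk_nil (node : Int) : pvWalk node [] = none := rfl
lemma pvWalk_cons (node : Int) (c : Char) (rest : List Char) :
    pvWalk node (c :: rest) =
      (match PySem.Dict.get? pvEDGES (node, c) with
       | none => none
       | some n =>
         match PySem.Dict.get? pvVALUES n with
         | some v => some v
         | none => pvWalk n rest) := rfl

-- the walk of the trie from each node, characterised by the word suffixes below it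
lemma walk_32 (l : List Char) : pvWalk 32 l = (if List.isPrefixOf ['e'] l then some 9 else none) := by
  cases l with
  | nil => simp [pvWalk_nil, List.isPrefixOf]
  | cons c rest =>
    rw [pvWalk_cons, edges_eq]
    by_cases h1 : 'e' = c
    · subst h1; simp [PySem.Dict.get?, values_eq, List.isPrefixOf]
    simp [PySem.Dict.get?, List.isPrefixOf, h1]

lemma walk_31 (l : List Char) : pvWalk 31 l = (if List.isPrefixOf ['n', 'e'] l then some 9 else none) := by
  cases l with
  | nil => simp [pvWalk_nil, List.isPrefixOf]
  | cons c rest =>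
    rw [pvWalk_cons, edges_eq]
    by_cases h1 : 'n' = c
    · subst h1; simp [PySem.Dict.get?, values_eq, walk_32, List.isPrefixOf]
    simp [PySem.Dict.get?, List.isPrefixOf, h1]

lemma walk_30 (l : List Char) : pvWalk 30 l = (if List.isPrefixOf ['i', 'n', 'e'] l then some 9 else none) := by
  cases l with
  | nil => simp [pvWalk_nil, List.isPrefixOf]
  | cons c rest =>
    rw [pvWalk_cons, edges_eq]
    by_cases h1 : 'i' = c
    · subst h1; simp [PySem.Dict.get?, values_eq, walk_31, List.isPrefixOf]
    simp [PySem.Dict.get?, List.isPrefixOf, h1]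

lemma walk_28 (l : List Char) : pvWalk 28 l = (if List.isPrefixOf ['t'] l then some 8 else none) := by
  cases l with
  | nil => simp [pvWalk_nil, List.isPrefixOf]
  | cons c rest =>
    rw [pvWalk_cons, edges_eq]
    by_cases h1 : 't' = c
    · subst h1; simp [PySem.Dict.get?, values_eq, List.isPrefixOf]
    simp [PySem.Dict.get?, List.isPrefixOf, h1]

lemma walk_27 (l : List Char) : pvWalk 27 l = (if List.isPrefixOf ['h', 't'] l then some 8 else none) := by
  cases l with
  | nil => simp [pvWalk_nil, List.isPrefixOf]
  | cons c rest =>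
    rw [pvWalk_cons, edges_eq]
    by_cases h1 : 'h' = c
    · subst h1; simp [PySem.Dict.get?, values_eq, walk_28, List.isPrefixOf]
    simp [PySem.Dict.get?, List.isPrefixOf, h1]

lemma walk_26 (l : List Char) : pvWalk 26 l = (if List.isPrefixOf ['g', 'h', 't'] l then some 8 else none) := by
  cases l with
  | nil => simp [pvWalk_nil, List.isPrefixOf]
  | cons c rest =>
    rw [pvWalk_cons, edges_eq]
    by_cases h1 : 'g' = c
    · subst h1; simp [PySem.Dict.get?, values_eq, walk_27, List.isPrefixOf]
    simp [PySem.Dict.get?, List.isPrefixOf, h1]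

lemma walk_25 (l : List Char) : pvWalk 25 l = (if List.isPrefixOf ['i', 'g', 'h', 't'] l then some 8 else none) := by
  cases l with
  | nil => simp [pvWalk_nil, List.isPrefixOf]
  | cons c rest =>
    rw [pvWalk_cons, edges_eq]
    by_cases h1 : 'i' = c
    · subst h1; simp [PySem.Dict.get?, values_eq, walk_26, List.isPrefixOf]
    simp [PySem.Dict.get?, List.isPrefixOf, h1]

lemma walk_23 (l : List Char) : pvWalk 23 l = (if List.isPrefixOf ['n'] l then some 7 else none) := by
  cases l with
  | nil => simp [pvWalk_nil, List.isPrefixOf]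
  | cons c rest =>
    rw [pvWalk_cons, edges_eq]
    by_cases h1 : 'n' = c
    · subst h1; simp [PySem.Dict.get?, values_eq, List.isPrefixOf]
    simp [PySem.Dict.get?, List.isPrefixOf, h1]

lemma walk_22 (l : List Char) : pvWalk 22 l = (if List.isPrefixOf ['e', 'n'] l then some 7 else none) := by
  cases l with
  | nil => simp [pvWalk_nil, List.isPrefixOf]
  | cons c rest =>
    rw [pvWalk_cons, edges_eq]
    by_cases h1 : 'e' = c
    · subst h1; simp [PySem.Dict.get?, values_eq, walk_23, List.isPrefixOf]
    simp [PySem.Dict.get?, List.isPrefixOf, h1]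

lemma walk_21 (l : List Char) : pvWalk 21 l = (if List.isPrefixOf ['v', 'e', 'n'] l then some 7 else none) := by
  cases l with
  | nil => simp [pvWalk_nil, List.isPrefixOf]
  | cons c rest =>
    rw [pvWalk_cons, edges_eq]
    by_cases h1 : 'v' = c
    · subst h1; simp [PySem.Dict.get?, values_eq, walk_22, List.isPrefixOf]
    simp [PySem.Dict.get?, List.isPrefixOf, h1]

lemma walk_19 (l : List Char) : pvWalk 19 l = (if List.isPrefixOf ['x'] l then some 6 else none) := by
  cases l with
  | nil => simp [pvWalk_nil, List.isPrefixOf]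
  | cons c rest =>
    rw [pvWalk_cons, edges_eq]
    by_cases h1 : 'x' = c
    · subst h1; simp [PySem.Dict.get?, values_eq, List.isPrefixOf]
    simp [PySem.Dict.get?, List.isPrefixOf, h1]

lemma walk_18 (l : List Char) : pvWalk 18 l = (if List.isPrefixOf ['i', 'x'] l then some 6 else (if List.isPrefixOf ['e', 'v', 'e', 'n'] l then some 7 else none)) := by
  cases l with
  | nil => simp [pvWalk_nil, List.isPrefixOf]
  | cons c rest =>
    rw [pvWalk_cons, edges_eq]
    by_cases h1 : 'i' = c
    · subst h1; simp [PySem.Dict.get?, values_eq, walk_19, List.isPrefixOf]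
    ·
      by_cases h2 : 'e' = c
      · subst h2; simp [PySem.Dict.get?, values_eq, walk_21, List.isPrefixOf]
      simp [PySem.Dict.get?, List.isPrefixOf, h1, h2]

lemma walk_16 (l : List Char) : pvWalk 16 l = (if List.isPrefixOf ['e'] l then some 5 else none) := by
  cases l with
  | nil => simp [pvWalk_nil, List.isPrefixOf]
  | cons c rest =>
    rw [pvWalk_cons, edges_eq]
    by_cases h1 : 'e' = c
    · subst h1; simp [PySem.Dict.get?, values_eq, List.isPrefixOf]
    simp [PySem.Dict.get?, List.isPrefixOf, h1]

lemma walk_15 (l : List Char) : pvWalk 15 l = (if List.isPrefixOf ['v', 'e'] l then some 5 else none) := by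
  cases l with
  | nil => simp [pvWalk_nil, List.isPrefixOf]
  | cons c rest =>
    rw [pvWalk_cons, edges_eq]
    by_cases h1 : 'v' = c
    · subst h1; simp [PySem.Dict.get?, values_eq, walk_16, List.isPrefixOf]
    simp [PySem.Dict.get?, List.isPrefixOf, h1]

lemma walk_13 (l : List Char) : pvWalk 13 l = (if List.isPrefixOf ['r'] l then some 4 else none) := by
  cases l with
  | nil => simp [pvWalk_nil, List.isPrefixOf]
  | cons c rest =>
    rw [pvWalk_cons, edges_eq]
    by_cases h1 : 'r' = c
    · subst h1; simp [PySem.Dict.get?, values_eq, List.isPrefixOf]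
    simp [PySem.Dict.get?, List.isPrefixOf, h1]

lemma walk_12 (l : List Char) : pvWalk 12 l = (if List.isPrefixOf ['u', 'r'] l then some 4 else none) := by
  cases l with
  | nil => simp [pvWalk_nil, List.isPrefixOf]
  | cons c rest =>
    rw [pvWalk_cons, edges_eq]
    by_cases h1 : 'u' = c
    · subst h1; simp [PySem.Dict.get?, values_eq, walk_13, List.isPrefixOf]
    simp [PySem.Dict.get?, List.isPrefixOf, h1]

lemma walk_11 (l : List Char) : pvWalk 11 l = (if List.isPrefixOf ['o', 'u', 'r'] l then some 4 else (if List.isPrefixOf ['i', 'v', 'e'] l then some 5 else none)) := by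
  cases l with
  | nil => simp [pvWalk_nil, List.isPrefixOf]
  | cons c rest =>
    rw [pvWalk_cons, edges_eq]
    by_cases h1 : 'o' = c
    · subst h1; simp [PySem.Dict.get?, values_eq, walk_12, List.isPrefixOf]
    ·
      by_cases h2 : 'i' = c
      · subst h2; simp [PySem.Dict.get?, values_eq, walk_15, List.isPrefixOf]
      simp [PySem.Dict.get?, List.isPrefixOf, h1, h2]

lemma walk_9 (l : List Char) : pvWalk 9 l = (if List.isPrefixOf ['e'] l then some 3 else none) := by
  cases l with
  | nil => simp [pvWalk_nil, List.isPrefixOf]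
  | cons c rest =>
    rw [pvWalk_cons, edges_eq]
    by_cases h1 : 'e' = c
    · subst h1; simp [PySem.Dict.get?, values_eq, List.isPrefixOf]
    simp [PySem.Dict.get?, List.isPrefixOf, h1]

lemma walk_8 (l : List Char) : pvWalk 8 l = (if List.isPrefixOf ['e', 'e'] l then some 3 else none) := by
  cases l with
  | nil => simp [pvWalk_nil, List.isPrefixOf]
  | cons c rest =>
    rw [pvWalk_cons, edges_eq]
    by_cases h1 : 'e' = c
    · subst h1; simp [PySem.Dict.get?, values_eq, walk_9, List.isPrefixOf]
    simp [PySem.Dict.get?, List.isPrefixOf, h1]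

lemma walk_7 (l : List Char) : pvWalk 7 l = (if List.isPrefixOf ['r', 'e', 'e'] l then some 3 else none) := by
  cases l with
  | nil => simp [pvWalk_nil, List.isPrefixOf]
  | cons c rest =>
    rw [pvWalk_cons, edges_eq]
    by_cases h1 : 'r' = c
    · subst h1; simp [PySem.Dict.get?, values_eq, walk_8, List.isPrefixOf]
    simp [PySem.Dict.get?, List.isPrefixOf, h1]

lemma walk_5 (l : List Char) : pvWalk 5 l = (if List.isPrefixOf ['o'] l then some 2 else none) := by
  cases l with
  | nil => simp [pvWalk_nil, List.isPrefixOf]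
  | cons c rest =>
    rw [pvWalk_cons, edges_eq]
    by_cases h1 : 'o' = c
    · subst h1; simp [PySem.Dict.get?, values_eq, List.isPrefixOf]
    simp [PySem.Dict.get?, List.isPrefixOf, h1]

lemma walk_4 (l : List Char) : pvWalk 4 l = (if List.isPrefixOf ['w', 'o'] l then some 2 else (if List.isPrefixOf ['h', 'r', 'e', 'e'] l then some 3 else none)) := by
  cases l with
  | nil => simp [pvWalk_nil, List.isPrefixOf]
  | cons c rest =>
    rw [pvWalk_cons, edges_eq]
    by_cases h1 : 'w' = c
    · subst h1; simp [PySem.Dict.get?, values_eq, walk_5, List.isPrefixOf]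
    ·
      by_cases h2 : 'h' = c
      · subst h2; simp [PySem.Dict.get?, values_eq, walk_7, List.isPrefixOf]
      simp [PySem.Dict.get?, List.isPrefixOf, h1, h2]

lemma walk_2 (l : List Char) : pvWalk 2 l = (if List.isPrefixOf ['e'] l then some 1 else none) := by
  cases l with
  | nil => simp [pvWalk_nil, List.isPrefixOf]
  | cons c rest =>
    rw [pvWalk_cons, edges_eq]
    by_cases h1 : 'e' = c
    · subst h1; simp [PySem.Dict.get?, values_eq, List.isPrefixOf]
    simp [PySem.Dict.get?, List.isPrefixOf, h1]

lemma walk_1 (l : List Char) : pvWalk 1 l = (if List.isPrefixOf ['n', 'e'] l then some 1 else none) := by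
  cases l with
  | nil => simp [pvWalk_nil, List.isPrefixOf]
  | cons c rest =>
    rw [pvWalk_cons, edges_eq]
    by_cases h1 : 'n' = c
    · subst h1; simp [PySem.Dict.get?, values_eq, walk_2, List.isPrefixOf]
    simp [PySem.Dict.get?, List.isPrefixOf, h1]

lemma walk_0 (l : List Char) : pvWalk 0 l = (if List.isPrefixOf ['o', 'n', 'e'] l then some 1 else (if List.isPrefixOf ['t', 'w', 'o'] l then some 2 else (if List.isPrefixOf ['t', 'h', 'r', 'e', 'e'] l then some 3 else (if List.isPrefixOf ['f', 'o', 'u', 'r'] l then some 4 else (if List.isPrefixOf ['f', 'i', 'v', 'e'] l then some 5 else (if List.isPrefixOf ['s', 'i', 'x'] l then some 6 else (if List.isPrefixOf ['s', 'e', 'v', 'e', 'n'] l then some 7 else (if List.isPrefixOf ['e', 'i', 'g', 'h', 't'] l then some 8 else (if List.isPrefixOf ['n', 'i', 'n', 'e'] l then some 9 else none))))))))) := by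
  cases l with
  | nil => simp [pvWalk_nil, List.isPrefixOf]
  | cons c rest =>
    rw [pvWalk_cons, edges_eq]
    by_cases h1 : 'o' = c
    · subst h1; simp [PySem.Dict.get?, values_eq, walk_1, List.isPrefixOf]
    ·
      by_cases h2 : 't' = c
      · subst h2; simp [PySem.Dict.get?, values_eq, walk_4, List.isPrefixOf]
      ·
        by_cases h3 : 'f' = c
        · subst h3; simp [PySem.Dict.get?, values_eq, walk_11, List.isPrefixOf]
        ·
          by_cases h4 : 's' = c
          · subst h4; simp [PySem.Dict.get?, values_eq, walk_18, List.isPrefixOf]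
          ·
            by_cases h5 : 'e' = c
            · subst h5; simp [PySem.Dict.get?, values_eq, walk_25, List.isPrefixOf]
            ·
              by_cases h6 : 'n' = c
              · subst h6; simp [PySem.Dict.get?, values_eq, walk_30, List.isPrefixOf]
              simp [PySem.Dict.get?, List.isPrefixOf, h1, h2, h3, h4, h5, h6]

-- ---- A-side characterisation ----

-- "word w is spelled at position index": the slice condition A tests
abbrev pvP (s : List Char) (i L : Int) (w : List Char) : Prop :=
  PySem.List.slice s (some i) (some (i + L)) = w

-- a match entails the per-word guard of A is false
lemma pvGuard_of_P (s : List Char) (i L : Int) (w : List Char) (h : pvP s i L w) :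
    ¬ (((PySem.List.slice s (some i) none).length : Int) < (w.length : Int)) := by
  have hl := congrArg List.length h
  rw [PySem.List.length_slice] at hl
  rw [PySem.List.slice_some_none]
  have h1 := PySem.List.clampIdx_le s.length (i + L)
  have h2 := PySem.List.clampIdx_le s.length i
  simp only [List.length_drop]
  omega

-- A's loop, with the redundant per-word length guard removed
def pvChainA (s : List Char) (index : Int) : List (Int × List Char) → Option Int
  | [] => none
  | (i, w) :: rest =>
    if pvP s index (w.length : Int) w then some (i + 1) else pvChainA s index rest

lemma loopA_chain (s : List Char) (i : Int) :
    ∀ ps, pvLoopA s i ps = pvChainA s i ps := by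
  intro ps
  induction ps with
  | nil => rfl
  | cons p rest ih =>
    obtain ⟨j, w⟩ := p
    simp only [pvLoopA, pvChainA]
    by_cases hc : pvP s i (w.length : Int) w
    · have hg := pvGuard_of_P s i (w.length : Int) w hc
      have hc' : PySem.List.slice s (some i) (some (i + (w.length : Int))) = w := hc
      rw [if_neg hg, if_pos hc', if_pos hc]
    · have hc' : ¬ PySem.List.slice s (some i) (some (i + (w.length : Int))) = w := hc
      by_cases hg : ((PySem.List.slice s (some i) none).length : Int) < (w.length : Int)
      · simp [hg, hc, ih]
      · simp [hg, hc', ih]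

lemma enumEq : PySem.List.enumerate pvSTRINGS =
  [(0, "one".toList), (1, "two".toList), (2, "three".toList), (3, "four".toList),
   (4, "five".toList), (5, "six".toList), (6, "seven".toList), (7, "eight".toList),
   (8, "nine".toList)] := by decide

lemma loopA_char (s : List Char) (i : Int) :
    pvLoopA s i (PySem.List.enumerate pvSTRINGS) =
      (if pvP s i 3 "one".toList then some 1 else
       if pvP s i 3 "two".toList then some 2 else
       if pvP s i 5 "three".toList then some 3 else
       if pvP s i 4 "four".toList then some 4 else
       if pvP s i 4 "five".toList then some 5 else
       if pvP s i 3 "six".toList then some 6 else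
       if pvP s i 5 "seven".toList then some 7 else
       if pvP s i 5 "eight".toList then some 8 else
       if pvP s i 4 "nine".toList then some 9 else none) := by
  rw [loopA_chain, enumEq]
  simp only [pvChainA]
  norm_num [show "one".toList.length = 3 from by decide,
    show "two".toList.length = 3 from by decide,
    show "three".toList.length = 5 from by decide,
    show "four".toList.length = 4 from by decide,
    show "five".toList.length = 4 from by decide,
    show "six".toList.length = 3 from by decide,
    show "seven".toList.length = 5 from by decide,
    show "eight".toList.length = 5 from by decide,
    show "nine".toList.length = 4 from by decide]

-- ---- slice arithmetic ----

lemma take_eq_pref {α : Type} (t : Nat) (xs w : List α) :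
    List.take t xs = w ↔ (w <+: xs ∧ min t xs.length = w.length) := by
  constructor
  · rintro rfl
    exact ⟨List.take_prefix _ _, (List.length_take).symm ▸ rfl⟩
  · rintro ⟨hp, hm⟩
    rcases le_or_gt t xs.length with h | h
    · have ht : t = w.length := by omega
      subst ht
      exact (List.prefix_iff_eq_take.mp hp).symm
    · have hw : w.length = xs.length := by omega
      have h1 : List.take t xs = xs := List.take_of_length_le (by omega)
      have h2 := List.prefix_iff_eq_take.mp hp
      rw [hw, List.take_length] at h2
      rw [h1]; exact h2.symm

lemma clampIdx_cast (n : Nat) (i : Int) :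
    ((PySem.List.clampIdx n i : Nat) : Int) = max 0 (min (if i < 0 then (n : Int) + i else i) n) := by
  unfold PySem.List.clampIdx
  split_ifs <;> omega

-- pvP holds exactly when w is a prefix of the substring AND A's stop index i+L does not
-- cross zero (the slice-clamping condition)
lemma pvP_iff (s : List Char) (i : Int) (w : List Char) (hL : 0 < w.length) :
    pvP s i (w.length : Int) w ↔
      (w <+: List.drop (PySem.List.clampIdx s.length i) s ∧
        (0 ≤ i ∨ (i + (w.length : Int) < 0 ∧ 0 ≤ (s.length : Int) + i))) := by
  unfold pvP
  simp only [PySem.List.slice]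
  rw [take_eq_pref]
  have h1 := clampIdx_cast s.length i
  have h2 := clampIdx_cast s.length (i + (w.length : Int))
  constructor
  · rintro ⟨hp, hm⟩
    refine ⟨hp, ?_⟩
    have hlen := hp.length_le
    rw [List.length_drop] at hlen
    simp only [List.length_drop] at hm
    rcases lt_or_ge i 0 with hi | hi
    · rcases lt_or_ge (i + (w.length : Int)) 0 with hj | hj
      · simp only [if_pos hi, if_pos hj] at h1 h2
        omega
      · simp only [if_pos hi, if_neg (not_lt.mpr hj)] at h1 h2
        omega
    · left; exact hi
  · rintro ⟨hp, hc⟩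
    refine ⟨hp, ?_⟩
    have hlen := hp.length_le
    rw [List.length_drop] at hlen
    simp only [List.length_drop]
    rcases hc with hi | ⟨hj, hk⟩
    · have hj : ¬ (i < 0) := not_lt.mpr hi
      have hj2 : ¬ (i + (w.length : Int) < 0) := by omega
      simp only [if_neg hj, if_neg hj2] at h1 h2
      omega
    · have hi : i < 0 := by omega
      simp only [if_pos hi, if_pos hj] at h1 h2
      omega

-- under ¬D_ (stated per word) the slice condition is plain prefix-at-position
lemma pvP_eq_pref (s : List Char) (i : Int) (w : List Char) (hL : 0 < w.length)
    (hD : ¬ (i < 0 ∧ w <+: List.drop (PySem.List.clampIdx s.length i) s ∧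
              (i < -(s.length : Int) ∨ 0 ≤ i + (w.length : Int)))) :
    (pvP s i (w.length : Int) w) = (w <+: List.drop (PySem.List.clampIdx s.length i) s) := by
  apply propext
  constructor
  · intro h
    exact ((pvP_iff s i w hL).mp h).1
  · intro hp
    apply (pvP_iff s i w hL).mpr
    refine ⟨hp, ?_⟩
    rcases lt_or_ge i 0 with hi | hi
    · right
      have := hp.length_le
      rw [List.length_drop] at this
      have hcc := clampIdx_cast s.length i
      simp only [if_pos hi] at hcc
      constructor
      · by_contra hcon
        exact hD ⟨hi, hp, Or.inr (by omega)⟩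
      · by_contra hcon
        exact hD ⟨hi, hp, Or.inl (by omega)⟩
    · left; exact hi

-- for i < 0 the clamped start used by D_ agrees with clampIdx
lemma clampIdx_neg_form (n : Nat) (i : Int) (hi : i < 0) :
    PySem.List.clampIdx n i = (max 0 ((n : Int) + i)).toNat := by
  have := clampIdx_cast n i
  simp only [if_pos hi] at this
  omega

-- none of the nine words is a prefix of another
lemma pvNoPrefix : ∀ w1 ∈ pvSTRINGS, ∀ w2 ∈ pvSTRINGS, (w1 <+: w2 ∨ w2 <+: w1) → w1 = w2 := by
  decide

-- convenient names for the nine character lists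
lemma wlist : ("one".toList = ['o','n','e'] ∧ "two".toList = ['t','w','o'] ∧
    "three".toList = ['t','h','r','e','e'] ∧ "four".toList = ['f','o','u','r'] ∧
    "five".toList = ['f','i','v','e'] ∧ "six".toList = ['s','i','x'] ∧
    "seven".toList = ['s','e','v','e','n'] ∧ "eight".toList = ['e','i','g','h','t'] ∧
    "nine".toList = ['n','i','n','e']) := by decide

-- goal-side variant with an explicit literal length
lemma pvP_eq_pref' (s : List Char) (i : Int) (w : List Char) (L : Int)
    (hLen : (w.length : Int) = L) (hL : 0 < w.length)
    (hD : ¬ (i < 0 ∧ w <+: List.drop (PySem.List.clampIdx s.length i) s ∧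
              (i < -(s.length : Int) ∨ 0 ≤ i + L))) :
    (pvP s i L w) = (w <+: List.drop (PySem.List.clampIdx s.length i) s) := by
  subst hLen
  exact pvP_eq_pref s i w hL hD

-- main chain equality: outside D_, A's word loop computes exactly the trie walk
lemma main_eq (s : List Char) (i : Int)
    (h : ∀ w ∈ pvSTRINGS, ¬ (i < 0 ∧ w <+: List.drop (PySem.List.clampIdx s.length i) s ∧
          (i < -(s.length : Int) ∨ 0 ≤ i + (w.length : Int)))) :
    pvLoopA s i (PySem.List.enumerate pvSTRINGS) =
      pvWalk 0 (List.drop (PySem.List.clampIdx s.length i) s) := by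
  obtain ⟨e1, e2, e3, e4, e5, e6, e7, e8, e9⟩ := wlist
  have c1 : (("one".toList.length : Nat) : Int) = 3 := by decide
  have c2 : (("two".toList.length : Nat) : Int) = 3 := by decide
  have c3 : (("three".toList.length : Nat) : Int) = 5 := by decide
  have c4 : (("four".toList.length : Nat) : Int) = 4 := by decide
  have c5 : (("five".toList.length : Nat) : Int) = 4 := by decide
  have c6 : (("six".toList.length : Nat) : Int) = 3 := by decide
  have c7 : (("seven".toList.length : Nat) : Int) = 5 := by decide
  have c8 : (("eight".toList.length : Nat) : Int) = 5 := by decide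
  have c9 : (("nine".toList.length : Nat) : Int) = 4 := by decide
  have hD1 := h "one".toList (by decide); rw [c1] at hD1
  have hD2 := h "two".toList (by decide); rw [c2] at hD2
  have hD3 := h "three".toList (by decide); rw [c3] at hD3
  have hD4 := h "four".toList (by decide); rw [c4] at hD4
  have hD5 := h "five".toList (by decide); rw [c5] at hD5
  have hD6 := h "six".toList (by decide); rw [c6] at hD6
  have hD7 := h "seven".toList (by decide); rw [c7] at hD7
  have hD8 := h "eight".toList (by decide); rw [c8] at hD8
  have hD9 := h "nine".toList (by decide); rw [c9] at hD9
  rw [loopA_char, walk_0]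
  simp only [
    pvP_eq_pref' s i "one".toList 3 (by decide) (by decide) hD1,
    pvP_eq_pref' s i "two".toList 3 (by decide) (by decide) hD2,
    pvP_eq_pref' s i "three".toList 5 (by decide) (by decide) hD3,
    pvP_eq_pref' s i "four".toList 4 (by decide) (by decide) hD4,
    pvP_eq_pref' s i "five".toList 4 (by decide) (by decide) hD5,
    pvP_eq_pref' s i "six".toList 3 (by decide) (by decide) hD6,
    pvP_eq_pref' s i "seven".toList 5 (by decide) (by decide) hD7,
    pvP_eq_pref' s i "eight".toList 5 (by decide) (by decide) hD8,
    pvP_eq_pref' s i "nine".toList 4 (by decide) (by decide) hD9]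
  simp only [e1, e2, e3, e4, e5, e6, e7, e8, e9, List.isPrefixOf_iff_prefix]

-- one witness of D_'s Boolean 'any'
lemma any_witness (string : String) (index : Int) (wstr : String)
    (hmem : wstr ∈ ["one", "two", "three", "four", "five", "six", "seven", "eight", "nine"])
    (hp : wstr.toList <+: List.drop (PySem.List.clampIdx string.toList.length index) string.toList)
    (hc : index < -(string.toList.length : Int) ∨ 0 ≤ index + (wstr.toList.length : Int))
    (hi : index < 0) :
    (["one", "two", "three", "four", "five", "six", "seven", "eight", "nine"].any
      (fun w => w.toList.isPrefixOf (string.toList.drop (max 0 ((string.length : Int) + index)).toNat)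
        && (decide (index < -(string.length : Int)) || decide (0 ≤ index + (w.toList.length : Int))))) = true := by
  rw [List.any_eq_true]
  refine ⟨wstr, hmem, ?_⟩
  rw [Bool.and_eq_true, List.isPrefixOf_iff_prefix, Bool.or_eq_true]
  have hdrop : (max 0 ((string.length : Int) + index)).toNat =
      PySem.List.clampIdx string.toList.length index := by
    rw [show string.length = string.toList.length from rfl]
    exact (clampIdx_neg_form _ index hi).symm
  refine ⟨by rw [hdrop]; exact hp, ?_⟩
  simp only [decide_eq_true_eq]
  rcases hc with h | h
  · left; rw [show string.length = string.toList.length from rfl]; exact h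
  · right; exact h

-- ¬D_ in the per-word form used by main_eq
lemma notD_perword (string : String) (index : Int)
    (hnd : ¬ D_find_digit_at_index string index) :
    ∀ w ∈ pvSTRINGS, ¬ (index < 0 ∧
      w <+: List.drop (PySem.List.clampIdx string.toList.length index) string.toList ∧
      (index < -(string.toList.length : Int) ∨ 0 ≤ index + (w.length : Int))) := by
  rintro w hw ⟨hi, hp, hc⟩
  apply hnd
  unfold D_find_digit_at_index
  refine ⟨hi, ?_⟩
  fin_cases hw <;> exact any_witness string index _ (by decide) hp hc hi

-- extraction from a D_ hypothesis
lemma D_extract (string : String) (index : Int) (hD : D_find_digit_at_index string index) :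
    index < 0 ∧ ∃ wstr ∈ (["one", "two", "three", "four", "five", "six", "seven", "eight", "nine"] : List String),
      wstr.toList <+: List.drop (PySem.List.clampIdx string.toList.length index) string.toList ∧
      (index < -(string.toList.length : Int) ∨ 0 ≤ index + (wstr.toList.length : Int)) := by
  obtain ⟨hi, hany⟩ := hD
  refine ⟨hi, ?_⟩
  rw [List.any_eq_true] at hany
  obtain ⟨wstr, hmem, hcond⟩ := hany
  rw [Bool.and_eq_true, List.isPrefixOf_iff_prefix, Bool.or_eq_true] at hcond
  obtain ⟨hp, hc⟩ := hcond
  have hdrop : (max 0 ((string.length : Int) + index)).toNat =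
      PySem.List.clampIdx string.toList.length index := by
    rw [show string.length = string.toList.length from rfl]
    exact (clampIdx_neg_form _ index hi).symm
  rw [hdrop] at hp
  simp only [decide_eq_true_eq] at hc
  refine ⟨wstr, hmem, hp, ?_⟩
  rcases hc with h | h
  · left; rw [show string.length = string.toList.length from rfl] at h; exact h
  · right; exact h

-- inside D_, A's slice condition fails for every word
lemma allP_false (string : String) (index : Int) (wstr : String)
    (hmem : wstr ∈ (["one", "two", "three", "four", "five", "six", "seven", "eight", "nine"] : List String))
    (hp : wstr.toList <+: List.drop (PySem.List.clampIdx string.toList.length index) string.toList)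
    (hc : index < -(string.toList.length : Int) ∨ 0 ≤ index + (wstr.toList.length : Int))
    (hi : index < 0) :
    ∀ w ∈ pvSTRINGS, ¬ pvP string.toList index (w.length : Int) w := by
  intro w hw hP
  have hwl : 0 < w.length := by fin_cases hw <;> decide
  obtain ⟨hwp, hdisj⟩ := (pvP_iff string.toList index w hwl).mp hP
  have hmem' : wstr.toList ∈ pvSTRINGS := by fin_cases hmem <;> decide
  have heq : w = wstr.toList :=
    pvNoPrefix w hw wstr.toList hmem' (List.prefix_or_prefix_of_prefix hwp hp)
  subst heq
  rcases hdisj with h | ⟨h1, h2⟩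
  · omega
  · rcases hc with h3 | h3 <;> omega


-- ===== VERDICT (by name: the statement is the Claim_ definition above) =====
theorem find_digit_at_index_spec : Claim_unchanged_find_digit_at_index := by
  intro string index _ hnd
  unfold find_digit_at_index find_digit_at_index_alt
  dsimp only
  by_cases hd : PySem.Chars.strIsdigit
      (PySem.List.slice (PySem.List.slice string.toList (some index) none) none (some 1))
  · simp only [hd, if_true]
  · simp only [hd, if_false, Bool.false_eq_true]
    rw [PySem.List.slice_some_none]
    exact main_eq string.toList index (notD_perword string index hnd)

set_option maxRecDepth 20000 in
theorem find_digit_at_index_changed : Claim_changed_find_digit_at_index := by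
  unfold Claim_changed_find_digit_at_index; decide

theorem find_digit_at_index_tight : Claim_exact_find_digit_at_index := by
  intro string index _ hD
  obtain ⟨hi, wstr, hmem, hp, hc⟩ := D_extract string index hD
  have hall := allP_false string index wstr hmem hp hc hi
  unfold find_digit_at_index find_digit_at_index_alt
  dsimp only
  rw [PySem.List.slice_some_none]
  obtain ⟨t, ht⟩ := hp
  -- the first character is a letter, not a digit
  have hdig : PySem.Chars.strIsdigit
      (PySem.List.slice (List.drop (PySem.List.clampIdx string.toList.length index) string.toList)
        none (some 1)) = false := by
    rw [← ht]
    fin_cases hmem <;> simp [PySem.List.slice] <;> decide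
  rw [hdig]
  simp only [Bool.false_eq_true, if_false]
  -- A's loop returns none
  have h1 := hall "one".toList (by decide); have h2 := hall "two".toList (by decide)
  have h3 := hall "three".toList (by decide); have h4 := hall "four".toList (by decide)
  have h5 := hall "five".toList (by decide); have h6 := hall "six".toList (by decide)
  have h7 := hall "seven".toList (by decide); have h8 := hall "eight".toList (by decide)
  have h9 := hall "nine".toList (by decide)
  rw [show (("one".toList.length : Nat) : Int) = 3 from by decide] at h1
  rw [show (("two".toList.length : Nat) : Int) = 3 from by decide] at h2
  rw [show (("three".toList.length : Nat) : Int) = 5 from by decide] at h3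
  rw [show (("four".toList.length : Nat) : Int) = 4 from by decide] at h4
  rw [show (("five".toList.length : Nat) : Int) = 4 from by decide] at h5
  rw [show (("six".toList.length : Nat) : Int) = 3 from by decide] at h6
  rw [show (("seven".toList.length : Nat) : Int) = 5 from by decide] at h7
  rw [show (("eight".toList.length : Nat) : Int) = 5 from by decide] at h8
  rw [show (("nine".toList.length : Nat) : Int) = 4 from by decide] at h9
  rw [loopA_char]
  rw [if_neg h1, if_neg h2, if_neg h3, if_neg h4, if_neg h5, if_neg h6, if_neg h7,
    if_neg h8, if_neg h9]
  -- B's walk returns a value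
  rw [walk_0]
  rw [← ht]
  obtain ⟨e1, e2, e3, e4, e5, e6, e7, e8, e9⟩ := wlist
  fin_cases hmem <;>
    simp [e1, e2, e3, e4, e5, e6, e7, e8, e9, List.isPrefixOf_iff_prefix]
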